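-- pv_equiv track=rewrite | github.com/Q1zyy/253503_GUDORYAN_77 | IGI/LR3/task4.py | words_with_double_letter
-- ===== SOURCE A (Python) =====
-- def words_with_double_letter(words:list[str]) -> list[(str, int)]:
--     """Returs the words with double letter"""
--     res = []
--     index = 0
--     for word in words:
--         add = False
--         for i in range(len(word) - 1):
--             if word[i] == word[i + 1]:
--                 add = True
--         if add:
--             res.append((word, index))
--         index += 1
--     return res
-- ===== SOURCE B (Python) =====
-- def _compress(word):
--     """Run-length dedup: keep a character only when it differs from the last kept one."""
--     dedup = []
--     for ch in word:
--         if not dedup or dedup[-1] != ch: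
--             dedup.append(ch)
--     return dedup
--
-- def words_with_double_letter(words: list[str]) -> list[(str, int)]:
--     """Returns the words with double letter"""
--     return [(w, i) for i, w in enumerate(words) if len(_compress(w)) < len(w)]
-- ===== Notes on version B (the rewrite author's own statement) =====
-- stated objective: alternative
-- what changed: B decides membership by run-length compression: it builds each word's consecutive-duplicate-free compression and keeps the word iff the compression is shorter than the word, replacing A's boolean-flag loop over adjacent index pairs and its explicit index counter with an enumerate comprehension.
import Mathlib
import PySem

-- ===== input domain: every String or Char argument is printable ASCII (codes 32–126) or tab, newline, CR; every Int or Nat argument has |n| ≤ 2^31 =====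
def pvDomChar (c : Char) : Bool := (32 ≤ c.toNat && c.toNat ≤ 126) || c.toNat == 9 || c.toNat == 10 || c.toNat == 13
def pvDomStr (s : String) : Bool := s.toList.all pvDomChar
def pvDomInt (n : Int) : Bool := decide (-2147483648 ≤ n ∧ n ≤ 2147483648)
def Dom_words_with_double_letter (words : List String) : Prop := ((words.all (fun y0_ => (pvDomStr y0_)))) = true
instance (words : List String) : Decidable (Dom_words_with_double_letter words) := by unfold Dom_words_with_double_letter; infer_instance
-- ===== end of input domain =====

-- B decides membership by run-length compression (a word qualifies iff its consecutive-duplicate-free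
-- compression is shorter than the word) instead of A's flag loop over adjacent index pairs (alternative, same cost).

-- ===== PORT A =====
def words_with_double_letter (words : List String) : List (String × Int) :=
  (words.foldl
    (fun (st : List (String × Int) × Int) word =>
      -- add = False; for i in range(len(word) - 1): if word[i] == word[i+1]: add = True
      let add := (PySem.List.pyRange 0 (PySem.Str.len word - 1) 1).foldl
        (fun add i =>
          if PySem.Str.pyGet? word i = PySem.Str.pyGet? word (i + 1) then true else add)
        false
      ((if add then st.1 ++ [(word, st.2)] else st.1), st.2 + 1))
    ([], 0)).1

-- ===== PORT B =====
-- _compress: dedup = []; for ch in word: if not dedup or dedup[-1] != ch: dedup.append(ch)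
def pvCompress (word : String) : List Char :=
  word.toList.foldl
    (fun dedup ch => if dedup.isEmpty || dedup.getLast? != some ch then dedup ++ [ch] else dedup)
    []

-- [(w, i) for i, w in enumerate(words) if len(_compress(w)) < len(w)]
def words_with_double_letter_alt (words : List String) : List (String × Int) :=
  ((PySem.List.enumerate words 0).filter
      (fun p => decide (((pvCompress p.2).length : Int) < PySem.Str.len p.2))).map
    (fun p => (p.2, p.1))

-- ===== PRECONDITION & SPEC =====
def Spec_words_with_double_letter (words : List String) (out : List (String × Int)) : Prop := out = words_with_double_letter_alt words
instance (words : List String) (out : List (String × Int)) : Decidable (Spec_words_with_double_letter words out) := by unfold Spec_words_with_double_letter; infer_instance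

-- ===== CLAIM (what is proved, stated in full; the proofs are below) =====
def Claim_equal_words_with_double_letter : Prop := ∀ (words : List String), Dom_words_with_double_letter words → Spec_words_with_double_letter words (words_with_double_letter words)

-- ===== LEMMAS AND PROOFS =====

-- A's flag fold is an 'or' over the list
theorem pv_foldl_or {α : Type} (p : α → Prop) [DecidablePred p] (xs : List α) (b : Bool) :
    xs.foldl (fun acc x => if p x then true else acc) b
      = (b || xs.any (fun x => decide (p x))) := by
  induction xs generalizing b with
  | nil => simp
  | cons x xs ih =>
    simp only [List.foldl_cons, List.any_cons, ih]
    by_cases h : p x <;> simp [h]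

-- A's inner flag equals the adjacent-pair test on the character list
theorem pv_inner_eq (w : String) :
    (PySem.List.pyRange 0 (PySem.Str.len w - 1) 1).foldl
      (fun add i =>
        if PySem.Str.pyGet? w i = PySem.Str.pyGet? w (i + 1) then true else add)
      false = (w.toList.zip (w.toList.drop 1)).any (fun p => p.1 == p.2) := by
  rw [pv_foldl_or]
  simp only [Bool.false_or]
  rcases Bool.eq_false_or_eq_true
      ((w.toList.zip (w.toList.drop 1)).any (fun p => p.1 == p.2)) with h | h
  · rw [h]
    simp only [List.any_eq_true] at h ⊢
    obtain ⟨p, hp, hpe⟩ := h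
    rw [List.mem_iff_getElem] at hp
    obtain ⟨k, hk, hpk⟩ := hp
    rw [List.length_zip, List.length_drop] at hk
    have hk1 : k + 1 < w.toList.length := by omega
    refine ⟨(k : Int), ?_, ?_⟩
    · rw [PySem.List.mem_pyRange_one]
      have hlen : w.toList.length = w.length := String.length_toList
      constructor
      · exact Int.natCast_nonneg k
      · simp only [PySem.Str.len_eq]; omega
    · rw [List.getElem_zip] at hpk
      subst hpk
      simp only [beq_iff_eq] at hpe
      have : ((k : Int) + 1) = ((k + 1 : ℕ) : Int) := by push_cast; ring
      rw [this]
      simp only [decide_eq_true_eq, PySem.Str.pyGet?_natCast]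
      rw [List.getElem?_eq_getElem (by omega), List.getElem?_eq_getElem hk1]
      simp [hpe]
  · rw [h]
    simp only [List.any_eq_false] at h ⊢
    rintro i hi
    rw [PySem.List.mem_pyRange_one] at hi
    obtain ⟨h0, h1⟩ := hi
    simp only [PySem.Str.len_eq] at h1
    lift i to ℕ using h0 with k
    have hlen : w.toList.length = w.length := String.length_toList
    have hk : k + 1 < w.toList.length := by omega
    have hmem : (w.toList[k], w.toList[k + 1]) ∈ w.toList.zip (w.toList.drop 1) := by
      rw [List.mem_iff_getElem]
      refine ⟨k, ?_, ?_⟩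
      · simp [List.length_zip]; omega
      · rw [List.getElem_zip]
        simp
    have hne := h _ hmem
    simp only [beq_iff_eq] at hne
    simp only [decide_eq_true_eq]
    have : ((k : Int) + 1) = ((k + 1 : ℕ) : Int) := by push_cast; ring
    rw [this]
    simp only [PySem.Str.pyGet?_natCast]
    rw [List.getElem?_eq_getElem (by omega), List.getElem?_eq_getElem hk]
    intro hc
    exact hne (Option.some.injEq _ _ ▸ hc)

-- destutter' always returns a list headed by its seed
theorem pv_destutter'_cons_shape (l : List Char) (a : Char) :
    ∃ t, List.destutter' Ne a l = a :: t := by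
  induction l generalizing a with
  | nil => exact ⟨[], rfl⟩
  | cons b t ih =>
    rw [List.destutter'_cons]
    by_cases h : a ≠ b
    · rw [if_pos h]
      exact ⟨List.destutter' Ne b t, rfl⟩
    · rw [if_neg h]
      exact ih a

-- B's dedup fold, from a nonempty accumulator, appends the tail of destutter'
theorem pv_fold_destutter (l : List Char) :
    ∀ (acc : List Char) (a : Char), acc.getLast? = some a →
    l.foldl
      (fun dedup ch => if dedup.isEmpty || dedup.getLast? != some ch then dedup ++ [ch] else dedup)
      acc = acc ++ (List.destutter' Ne a l).tail := by
  induction l with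
  | nil => intro acc a _; simp [List.destutter']
  | cons b t ih =>
    intro acc a hlast
    have hne : acc ≠ [] := by intro h; rw [h] at hlast; simp at hlast
    have hemp : acc.isEmpty = false := by simpa [List.isEmpty_iff] using hne
    simp only [List.foldl_cons, hemp, hlast, Bool.false_or, List.destutter'_cons]
    by_cases hab : a ≠ b
    · have hb : (some a != some b) = true := by simpa using hab
      rw [hb]
      simp only [if_true]
      rw [ih (acc ++ [b]) b (by simp)]
      obtain ⟨t', ht'⟩ := pv_destutter'_cons_shape t b
      simp [ht', hab]
    · have hb : (some a != some b) = false := by simpa using hab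
      rw [hb]
      simp only [if_false, hab]
      exact ih acc a hlast

-- _compress computes destutter Ne on the character list
theorem pv_compress_eq_destutter (w : String) :
    pvCompress w = List.destutter Ne w.toList := by
  unfold pvCompress
  cases hw : w.toList with
  | nil => simp [List.destutter]
  | cons c cs =>
    simp only [List.foldl_cons, List.isEmpty_nil, Bool.true_or, if_true, List.nil_append]
    rw [pv_fold_destutter cs [c] c (by simp)]
    obtain ⟨t', ht'⟩ := pv_destutter'_cons_shape cs c
    rw [List.destutter_cons', ht']
    simp

-- the compression is strictly shorter exactly when the list is not an Ne-chain
theorem pv_destutter_lt_iff (l : List Char) :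
    (List.destutter Ne l).length < l.length ↔ ¬ l.IsChain Ne := by
  constructor
  · intro hlt hchain
    have : List.destutter Ne l = l := by
      cases l with
      | nil => rfl
      | cons a t => rw [List.destutter_cons']; exact List.destutter'_of_isChain_cons (l := t) (R := Ne) hchain
    rw [this] at hlt
    omega
  · intro hchain
    have hle : (List.destutter Ne l).length ≤ l.length :=
      (List.destutter_sublist Ne l).length_le
    rcases Nat.lt_or_ge (List.destutter Ne l).length l.length with h | h
    · exact h
    · exfalso
      have heq : List.destutter Ne l = l :=
        (List.destutter_sublist Ne l).eq_of_length (by omega)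
      exact hchain (heq ▸ List.isChain_destutter (R := Ne) l)

-- the adjacent-pair test is the negation of being an Ne-chain
theorem pv_zip_any_iff (l : List Char) :
    ((l.zip (l.drop 1)).any (fun p => p.1 == p.2)) = true ↔ ¬ l.IsChain Ne := by
  induction l with
  | nil => simp
  | cons a t ih =>
    cases t with
    | nil => simp
    | cons b u =>
      have ih' : (((b :: u).zip u).any fun p => p.1 == p.2) = true ↔ ¬ (b :: u).IsChain Ne := by
        simpa using ih
      simp only [List.drop_succ_cons, List.drop_zero, List.zip_cons_cons, List.any_cons,
        Bool.or_eq_true, beq_iff_eq, List.isChain_cons_cons, ih']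
      constructor
      · rintro (h | h) hc
        · exact hc.1 h
        · exact h hc.2
      · intro h
        by_cases hab : a = b
        · exact Or.inl hab
        · exact Or.inr (fun hc => h ⟨hab, hc⟩)

-- A's inner flag equals B's compression-length test
theorem pv_flag_eq (w : String) :
    (PySem.List.pyRange 0 (PySem.Str.len w - 1) 1).foldl
      (fun add i =>
        if PySem.Str.pyGet? w i = PySem.Str.pyGet? w (i + 1) then true else add)
      false = decide (((pvCompress w).length : Int) < PySem.Str.len w) := by
  rw [pv_inner_eq]
  have hiff : (((pvCompress w).length : Int) < PySem.Str.len w) ↔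
      ¬ w.toList.IsChain Ne := by
    rw [pv_compress_eq_destutter, PySem.Str.len_eq, ← pv_destutter_lt_iff]
    exact_mod_cast Iff.rfl
  rcases Bool.eq_false_or_eq_true
      ((w.toList.zip (w.toList.drop 1)).any (fun p => p.1 == p.2)) with h | h
  · rw [h]
    exact (decide_eq_true (hiff.mpr ((pv_zip_any_iff w.toList).mp h))).symm
  · have hch : w.toList.IsChain Ne := by
      by_contra hn
      rw [(pv_zip_any_iff w.toList).mpr hn] at h
      simp at h
    rw [h]
    symm
    rw [decide_eq_false_iff_not]
    exact fun hl => (hiff.mp hl) hch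

-- the outer fold with explicit counter equals the enumerate/filter/map pipeline
theorem pv_outer (q : String → Bool) (words : List String) (res : List (String × Int)) (k : Int) :
    (words.foldl
      (fun (st : List (String × Int) × Int) (word : String) =>
        ((if q word then st.1 ++ [(word, st.2)] else st.1), st.2 + 1))
      (res, k)).1 =
    res ++ ((PySem.List.enumerate words k).filter (fun p => q p.2)).map
      (fun p => (p.2, p.1)) := by
  induction words generalizing res k with
  | nil => simp [PySem.List.enumerate_nil]
  | cons w ws ih =>
    rw [PySem.List.enumerate_cons]
    simp only [List.foldl_cons]
    by_cases h : q w = true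
    · simp only [h, if_true, ih, List.filter_cons, List.map_cons]
      simp
    · simp only [h, ih, List.filter_cons]
      simp

-- ===== VERDICT (by name: the statement is the Claim_ definition above) =====
theorem words_with_double_letter_spec : Claim_equal_words_with_double_letter := by
  intro words _
  show _ = _
  unfold words_with_double_letter words_with_double_letter_alt
  have hstep : (fun (st : List (String × Int) × Int) (word : String) =>
      let add := (PySem.List.pyRange 0 (PySem.Str.len word - 1) 1).foldl
        (fun add i =>
          if PySem.Str.pyGet? word i = PySem.Str.pyGet? word (i + 1) then true else add)
        false
      ((if add then st.1 ++ [(word, st.2)] else st.1), st.2 + 1)) =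
    (fun (st : List (String × Int) × Int) (word : String) =>
      ((if decide (((pvCompress word).length : Int) < PySem.Str.len word)
        then st.1 ++ [(word, st.2)] else st.1), st.2 + 1)) := by
    funext st word
    simp only [pv_flag_eq]
  rw [hstep, pv_outer]
  simp
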